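-- pv_equiv track=rewrite | github.com/JetBrains/intellij-community | python/helpers/pydev/runfiles.py | long_has_args
-- ===== SOURCE A (Python) =====
-- class GetoptError(Exception):
--     opt = ''
--     msg = ''
--     def __init__(self, msg, opt=''):
--         self.msg = msg
--         self.opt = opt
--         Exception.__init__(self, msg, opt)
--
--     def __str__(self):
--         return self.msg
--
-- def long_has_args(opt, longopts):
--     possibilities = [o for o in longopts if o.startswith(opt)]
--     if not possibilities:
--         raise GetoptError('option --%s not recognized' % opt, opt)
--     # Is there an exact match?
--     if opt in possibilities:
--         return False, opt
--     elif opt + '=' in possibilities: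
--         return True, opt
--     # No exact match, so better be unique.
--     if len(possibilities) > 1:
--         # XXX since possibilities contains all valid continuations, might be
--         # nice to work them into the error msg
--         raise GetoptError('option --%s not a unique prefix' % opt, opt)
--     assert len(possibilities) == 1
--     unique_match = possibilities[0]
--     has_arg = unique_match.endswith('=')
--     if has_arg:
--         unique_match = unique_match[:-1]
--     return has_arg, unique_match
-- ===== SOURCE B (Python) =====
-- class GetoptError(Exception):
--     opt = ''
--     msg = ''
--     def __init__(self, msg, opt=''):
--         self.msg = msg
--         self.opt = opt
--         Exception.__init__(self, msg, opt)
--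
--     def __str__(self):
--         return self.msg
--
--
-- def _resolve(opt, rest, found):
--     # Recursively scan for prefix matches; abort as ambiguous on a second match.
--     if not rest:
--         if found is None:
--             raise GetoptError('option --%s not recognized' % opt, opt)
--         if found.endswith('='):
--             return True, found[:-1]
--         return False, found
--     head, tail = rest[0], rest[1:]
--     if head.startswith(opt):
--         if found is not None:
--             raise GetoptError('option --%s not a unique prefix' % opt, opt)
--         return _resolve(opt, tail, head)
--     return _resolve(opt, tail, found)
--
--
-- def long_has_args(opt, longopts):
--     # Exact matches can be tested directly on longopts (opt and opt+'=' are
--     # trivially prefixes of themselves, so they are in the filtered list of A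
--     # iff they are in longopts); the remaining case is resolved recursively.
--     if opt in longopts:
--         return False, opt
--     if opt + '=' in longopts:
--         return True, opt
--     return _resolve(opt, longopts, None)
-- ===== Notes on version B (the rewrite author's own statement) =====
-- stated objective: alternative
-- what changed: B never builds the possibilities list: exact matches of opt and opt+'=' are tested by direct membership in longopts (correct because both are prefixes of themselves), and the remaining unique-prefix case is resolved by a recursive scan carrying at most one saved match that aborts as ambiguous on a second prefix match.
import Mathlib
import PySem

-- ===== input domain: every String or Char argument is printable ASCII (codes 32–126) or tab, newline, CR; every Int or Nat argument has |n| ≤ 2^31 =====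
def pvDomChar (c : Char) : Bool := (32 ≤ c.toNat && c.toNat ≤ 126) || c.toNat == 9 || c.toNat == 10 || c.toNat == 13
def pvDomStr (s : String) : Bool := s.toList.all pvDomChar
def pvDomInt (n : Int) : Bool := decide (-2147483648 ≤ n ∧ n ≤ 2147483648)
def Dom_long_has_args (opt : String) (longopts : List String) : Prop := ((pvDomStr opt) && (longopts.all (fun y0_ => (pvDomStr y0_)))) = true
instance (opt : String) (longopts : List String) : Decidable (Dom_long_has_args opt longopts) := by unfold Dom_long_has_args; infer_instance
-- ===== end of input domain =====

-- B drops A's possibilities list: direct membership tests for opt / opt+'=' plus a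
-- recursive unique-prefix scan carrying at most one saved match (alternative algorithm).

-- ===== PORT A =====
-- the two `raise GetoptError` branches return a placeholder (false, ""); Pre_ excludes those inputs
def long_has_args (opt : String) (longopts : List String) : Bool × String :=
  let possibilities := longopts.filter (fun o => PySem.Str.startswith o opt)
  if possibilities.isEmpty then (false, "")            -- raise 'not recognized'
  else if possibilities.contains opt then (false, opt)
  else if possibilities.contains (opt ++ "=") then (true, opt)
  else if possibilities.length > 1 then (false, "")    -- raise 'not a unique prefix'
  else
    let unique_match := possibilities.headD ""
    let has_arg := PySem.Str.endswith unique_match "="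
    if has_arg then (true, PySem.Str.slice unique_match none (some (-1)))
    else (false, unique_match)

-- ===== PORT B =====
-- _resolve; raise branches return the placeholder (false, "")
def pvResolve (opt : String) (rest : List String) (found : Option String) : Bool × String :=
  match rest with
  | [] =>
    match found with
    | none => (false, "")                              -- raise 'not recognized'
    | some f =>
      if PySem.Str.endswith f "=" then (true, PySem.Str.slice f none (some (-1)))
      else (false, f)
  | head :: tail =>
    if PySem.Str.startswith head opt then
      if found.isSome then (false, "")                 -- raise 'not a unique prefix'
      else pvResolve opt tail (some head)
    else pvResolve opt tail found

def long_has_args_alt (opt : String) (longopts : List String) : Bool × String :=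
  if longopts.contains opt then (false, opt)
  else if longopts.contains (opt ++ "=") then (true, opt)
  else pvResolve opt longopts none

-- ===== PRECONDITION & SPEC =====
-- Pre_ excludes exactly the inputs on which the Python A raises GetoptError:
-- no element of longopts starts with opt, or several do and none is opt or opt+'='.
def Pre_long_has_args (opt : String) (longopts : List String) : Prop :=
  let m := longopts.filter (fun o => PySem.Str.startswith o opt)
  m ≠ [] ∧ (opt ∈ m ∨ (opt ++ "=") ∈ m ∨ m.length = 1)

instance (opt : String) (longopts : List String) : Decidable (Pre_long_has_args opt longopts) := by
  unfold Pre_long_has_args; infer_instance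

def pvWitness_long_has_args : String × List String := ("fo", ["foo", "bar"])

def Spec_long_has_args (opt : String) (longopts : List String) (out : Bool × String) : Prop := out = long_has_args_alt opt longopts
instance (opt : String) (longopts : List String) (out : Bool × String) : Decidable (Spec_long_has_args opt longopts out) := by unfold Spec_long_has_args; infer_instance

-- ===== CLAIM (what is proved, stated in full; the proofs are below) =====
def Claim_equal_long_has_args : Prop := ∀ (opt : String) (longopts : List String), Dom_long_has_args opt longopts → Pre_long_has_args opt longopts → Spec_long_has_args opt longopts (long_has_args opt longopts)

-- ===== LEMMAS AND PROOFS =====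

-- a list of chars starts with itself, and cs++['='] starts with cs
theorem pv_startswith_self (s : List Char) : PySem.Chars.startswith s s = true := by
  simp [PySem.Chars.startswith_iff]

theorem pv_startswith_append (s t : List Char) : PySem.Chars.startswith (s ++ t) s = true := by
  simp [PySem.Chars.startswith_iff]

-- membership of opt (resp. opt+'=') in the filtered list equals membership in longopts
theorem pv_mem_filter_self (opt : String) (l : List String) :
    opt ∈ l.filter (fun o => PySem.Str.startswith o opt) ↔ opt ∈ l := by
  simp [List.mem_filter, pv_startswith_self]

theorem pv_mem_filter_eq (opt : String) (l : List String) :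
    (opt ++ "=") ∈ l.filter (fun o => PySem.Str.startswith o opt) ↔ (opt ++ "=") ∈ l := by
  simp [List.mem_filter, pv_startswith_append]

-- pvResolve with no further prefix matches finishes with the saved match
theorem pv_resolve_none (opt : String) (l : List String)
    (h : l.filter (fun o => PySem.Str.startswith o opt) = []) (f : String) :
    pvResolve opt l (some f) =
      (if PySem.Str.endswith f "=" then (true, PySem.Str.slice f none (some (-1)))
       else (false, f)) := by
  induction l with
  | nil => rfl
  | cons a t ih =>
    rw [List.filter_cons] at h
    by_cases ha : PySem.Chars.startswith a.toList opt.toList = true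
    · simp [PySem.Str.startswith_eq, ha] at h
    · simp only [PySem.Str.startswith_eq, ha, if_false, Bool.false_eq_true] at h
      simp only [pvResolve, PySem.Str.startswith_eq, ha, if_false, Bool.false_eq_true]
      exact ih h

-- pvResolve from an empty saved state with exactly one prefix match finishes with it
theorem pv_resolve_unique (opt : String) (l : List String) (a : String)
    (h : l.filter (fun o => PySem.Str.startswith o opt) = [a]) :
    pvResolve opt l none =
      (if PySem.Str.endswith a "=" then (true, PySem.Str.slice a none (some (-1)))
       else (false, a)) := by
  induction l with
  | nil => simp at h
  | cons b t ih =>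
    rw [List.filter_cons] at h
    by_cases hb : PySem.Chars.startswith b.toList opt.toList = true
    · simp only [PySem.Str.startswith_eq, hb, if_true] at h
      obtain ⟨rfl, ht⟩ : b = a ∧ t.filter (fun o => PySem.Str.startswith o opt) = [] :=
        ⟨(List.cons_eq_cons.mp h).1, (List.cons_eq_cons.mp h).2⟩
      simp only [pvResolve, PySem.Str.startswith_eq, hb, if_true, Option.isSome_none,
        Bool.false_eq_true, if_false]
      exact pv_resolve_none opt t ht b
    · simp only [PySem.Str.startswith_eq, hb, if_false, Bool.false_eq_true] at h
      simp only [pvResolve, PySem.Str.startswith_eq, hb, if_false, Bool.false_eq_true]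
      exact ih h

-- ===== VERDICT (by name: the statement is the Claim_ definition above) =====
theorem long_has_args_spec : Claim_equal_long_has_args := by
  intro opt longopts _ hpre
  simp only [Pre_long_has_args] at hpre
  obtain ⟨hne, hcase⟩ := hpre
  simp only [Spec_long_has_args, long_has_args, long_has_args_alt]
  set m := longopts.filter (fun o => PySem.Str.startswith o opt) with hm
  have hemp : ¬ m.isEmpty = true := by simp [List.isEmpty_iff]; exact hne
  by_cases h1 : opt ∈ longopts
  · have : opt ∈ m := (pv_mem_filter_self opt longopts).mpr h1
    simp [hemp, this, h1]
  · have h1m : opt ∉ m := fun h => h1 ((pv_mem_filter_self opt longopts).mp h)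
    by_cases h2 : (opt ++ "=") ∈ longopts
    · have : (opt ++ "=") ∈ m := (pv_mem_filter_eq opt longopts).mpr h2
      simp [hemp, h1m, h1, this, h2]
    · have h2m : (opt ++ "=") ∉ m := fun h => h2 ((pv_mem_filter_eq opt longopts).mp h)
      have hlen1 : m.length = 1 := by
        rcases hcase with h | h | h
        · exact absurd h h1m
        · exact absurd h h2m
        · exact h
      obtain ⟨a, ha⟩ := List.length_eq_one_iff.mp hlen1
      rw [ha] at h1m h2m
      simp only [if_false, List.contains_eq_mem, decide_eq_true_eq, h1m, h1, h2m, h2,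
        if_false, ha, List.length_singleton, List.headD_cons, gt_iff_lt, Nat.lt_irrefl]
      rw [pv_resolve_unique opt longopts a (hm ▸ ha)]
      simp
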